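-- pv_equiv track=rewrite | github.com/jovnc/aoc | src/2025/d2/solution.py | is_valid_chunk
-- ===== SOURCE A (Python) =====
-- def is_valid_chunk(number: int, chunk_size: int) -> bool:
--     """Check if a chunk of the number is valid."""
--     num_str = str(number)
--     if len(num_str) % chunk_size != 0:
--         return True
--     chunks = [
--         num_str[i : i + chunk_size] for i in range(0, len(num_str), chunk_size)
--     ]
--     return not all(chunk == chunks[0] for chunk in chunks)
-- ===== SOURCE B (Python) =====
-- def is_valid_chunk(number: int, chunk_size: int) -> bool:
--     """Check if a chunk of the number is valid."""
--     num_str = str(number)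
--     return len(num_str) % chunk_size != 0 or num_str[chunk_size:] != num_str[:-chunk_size]
-- ===== Notes on version B (the rewrite author's own statement) =====
-- stated objective: simpler
-- what changed: B drops the chunk-list comprehension and the all() scan entirely and tests periodicity with one shifted-slice comparison, s[chunk_size:] != s[:-chunk_size], folded into a single boolean expression.
-- outside the precondition, e.g. on is_valid_chunk(1234, -2): A returns False, B returns True; on is_valid_chunk(123, 0): A raises ZeroDivisionError, B raises ZeroDivisionError
import Mathlib
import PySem

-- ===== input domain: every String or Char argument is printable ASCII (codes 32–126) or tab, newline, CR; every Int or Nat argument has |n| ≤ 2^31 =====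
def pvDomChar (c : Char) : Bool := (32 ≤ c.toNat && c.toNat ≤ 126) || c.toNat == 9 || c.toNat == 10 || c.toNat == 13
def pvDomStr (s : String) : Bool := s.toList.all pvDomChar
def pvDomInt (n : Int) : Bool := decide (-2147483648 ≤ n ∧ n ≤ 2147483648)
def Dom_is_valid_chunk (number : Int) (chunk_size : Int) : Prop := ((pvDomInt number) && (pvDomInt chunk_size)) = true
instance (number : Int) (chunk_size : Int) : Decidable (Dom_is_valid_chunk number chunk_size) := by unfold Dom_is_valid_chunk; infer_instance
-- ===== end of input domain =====

-- B replaces the chunk-list comprehension and the all() scan by one shifted-slice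
-- periodicity test s[chunk_size:] != s[:-chunk_size] in a single boolean expression;
-- objective: simpler (no speed claim).

-- ===== PORT A =====
def is_valid_chunk (number : Int) (chunk_size : Int) : Bool :=
  let num_str := PySem.Int.toChars number
  if PySem.Int.mod (PySem.List.len num_str) chunk_size ≠ 0 then true
  else
    let chunks := (PySem.List.pyRange 0 (PySem.List.len num_str) chunk_size).map
      (fun i => PySem.List.slice num_str (some i) (some (i + chunk_size)))
    -- chunks[0] in Python is only evaluated when chunks is nonempty, so headD is exact
    ! chunks.all (fun chunk => chunk == chunks.headD [])

-- ===== PORT B =====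
def is_valid_chunk_alt (number : Int) (chunk_size : Int) : Bool :=
  let num_str := PySem.Int.toChars number
  (PySem.Int.mod (PySem.List.len num_str) chunk_size != 0) ||
    !(PySem.List.slice num_str (some chunk_size) none
        == PySem.List.slice num_str none (some (-chunk_size)))

-- ===== PRECONDITION & SPEC =====
-- Pre_ excludes chunk_size = 0, where A raises ZeroDivisionError, and negative
-- chunk_size dividing len(str(number)): there A's chunk list is empty, a corner no
-- caller would specify, where A's vacuous False and B's slice comparison are both accidental.
def Pre_is_valid_chunk (number : Int) (chunk_size : Int) : Prop :=
  1 ≤ chunk_size ∨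
    (chunk_size ≤ -1 ∧ ¬ (chunk_size ∣ PySem.List.len (PySem.Int.toChars number)))
instance (number : Int) (chunk_size : Int) : Decidable (Pre_is_valid_chunk number chunk_size) := by unfold Pre_is_valid_chunk; infer_instance
def pvWitness_is_valid_chunk : Int × Int := (1212, 2)
def Spec_is_valid_chunk (number : Int) (chunk_size : Int) (out : Bool) : Prop := out = is_valid_chunk_alt number chunk_size
instance (number : Int) (chunk_size : Int) (out : Bool) : Decidable (Spec_is_valid_chunk number chunk_size out) := by unfold Spec_is_valid_chunk; infer_instance

-- ===== CLAIM (what is proved, stated in full; the proofs are below) =====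
def Claim_equal_is_valid_chunk : Prop := ∀ (number : Int) (chunk_size : Int), Dom_is_valid_chunk number chunk_size → Pre_is_valid_chunk number chunk_size → Spec_is_valid_chunk number chunk_size (is_valid_chunk number chunk_size)

-- ===== LEMMAS AND PROOFS =====

-- all chunks equal a fixed block c of length cs  ↔  l is c repeated q times
lemma chunks_all_eq_iff (cs : Nat) (c : List Char) (hc : c.length = cs) :
    ∀ (q : Nat) (l : List Char), l.length = q * cs →
      (((List.range q).map (fun k => (l.drop (k * cs)).take cs)).all (fun chunk => chunk == c))
        = (l == (List.replicate q c).flatten) := by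
  intro q
  induction q with
  | zero =>
      intro l hl
      simp only [Nat.zero_mul, List.length_eq_zero_iff] at hl
      subst hl; simp
  | succ q ih =>
      intro l hl
      rw [List.range_succ_eq_map]
      simp only [List.map_cons, List.map_map, List.all_cons, List.replicate_succ,
        List.flatten_cons, Nat.zero_mul, List.drop_zero]
      have hdrop : (l.drop cs).length = q * cs := by
        rw [List.length_drop, hl, Nat.succ_mul]; omega
      have hrec := ih (l.drop cs) hdrop
      have hshift : ((List.range q).map ((fun k => (l.drop (k * cs)).take cs) ∘ (· + 1)))
          = (List.range q).map (fun k => ((l.drop cs).drop (k * cs)).take cs) := by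
        apply List.map_congr_left
        intro k _
        simp only [Function.comp]
        rw [List.drop_drop]
        congr 2
        ring
      rw [hshift, hrec]
      by_cases h1 : l.take cs = c
      · by_cases h2 : l.drop cs = (List.replicate q c).flatten
        · have he : l = c ++ (List.replicate q c).flatten := by
            conv_lhs => rw [← List.take_append_drop cs l, h1, h2]
          rw [he, List.take_left' hc, List.drop_left' hc]
          simp
        · have hne : l ≠ c ++ (List.replicate q c).flatten := by
            intro he
            apply h2
            have := congrArg (List.drop cs) he
            rwa [List.drop_left' hc] at this
          rw [h1, beq_eq_false_iff_ne.mpr h2, beq_eq_false_iff_ne.mpr hne]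
          simp
      · have hne : l ≠ c ++ (List.replicate q c).flatten := by
          intro he
          apply h1
          have := congrArg (List.take cs) he
          rwa [List.take_left' hc] at this
        rw [beq_eq_false_iff_ne.mpr h1, beq_eq_false_iff_ne.mpr hne]
        simp

-- l equals its first block repeated q times  ↔  l shifted by cs equals l truncated by cs
lemma replicate_eq_shift (cs : Nat) :
    ∀ (q : Nat) (l : List Char), l.length = q * cs →
      (l == (List.replicate q (l.take cs)).flatten)
        = (l.drop cs == l.take (l.length - cs)) := by
  intro q
  induction q with
  | zero =>
      intro l hl
      simp only [Nat.zero_mul, List.length_eq_zero_iff] at hl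
      subst hl; simp
  | succ q ih =>
      intro l hl
      rw [Bool.eq_iff_iff]
      simp only [beq_iff_eq]
      set c := l.take cs with hcdef
      have hc : c.length = cs := by
        rw [hcdef, List.length_take, hl]
        exact Nat.min_eq_left (Nat.le_mul_of_pos_left cs (Nat.succ_pos q))
      have hflatlen : ((List.replicate q c).flatten).length = q * cs := by
        rw [List.length_flatten, List.map_replicate, List.sum_replicate, hc, smul_eq_mul]
      have hlen_sub : l.length - cs = q * cs := by rw [hl, Nat.succ_mul]; omega
      rw [hlen_sub]
      constructor
      · intro h
        -- both sides equal flatten (replicate q c)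
        have hsucc : List.replicate (q + 1) c = List.replicate q c ++ [c] := by
          rw [List.replicate_succ']
        have hdropc : l.drop cs = (List.replicate q c).flatten := by
          rw [h, List.replicate_succ, List.flatten_cons, List.drop_left' hc]
        have htakec : l.take (q * cs) = (List.replicate q c).flatten := by
          rw [h, hsucc, List.flatten_append, List.take_left' hflatlen]
        rw [hdropc, htakec]
      · intro h
        -- IH on the tail
        have hl' : (l.drop cs).length = q * cs := by
          rw [List.length_drop, hl, Nat.succ_mul]; omega
        rcases Nat.eq_zero_or_pos q with hq0 | hqpos
        · subst hq0
          have hlcs : l.length = cs := by rw [hl]; ring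
          have : l = c := by rw [hcdef, ← hlcs, List.take_length]
          rw [List.replicate_succ]
          simp [← this]
        · have hdd : (l.drop cs).drop cs = (l.drop cs).take ((l.drop cs).length - cs) := by
            rw [hl']
            conv_lhs => rw [h]
            rw [List.drop_take]
          have hIH := (Bool.eq_iff_iff.mp (ih (l.drop cs) hl')).mpr (beq_iff_eq.mpr hdd)
          have hIH' : l.drop cs = (List.replicate q ((l.drop cs).take cs)).flatten :=
            beq_iff_eq.mp hIH
          have htc : (l.drop cs).take cs = c := by
            rw [h, List.take_take, Nat.min_eq_left (Nat.le_mul_of_pos_left cs hqpos), hcdef]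
          rw [htc] at hIH'
          conv_lhs => rw [← List.take_append_drop cs l, ← hcdef, hIH']
          rw [List.replicate_succ, List.flatten_cons]

theorem is_valid_chunk_spec : Claim_equal_is_valid_chunk := by
  intro number chunk_size _ hpre
  unfold Pre_is_valid_chunk at hpre
  unfold Spec_is_valid_chunk
  rcases hpre with hpre | ⟨hneg, hndvd⟩
  case inr =>
    simp only [PySem.List.len_eq] at hndvd
    unfold is_valid_chunk is_valid_chunk_alt
    simp only [PySem.List.len_eq]
    have hmod : PySem.Int.mod ((PySem.Int.toChars number).length : Int) chunk_size ≠ 0 := by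
      intro h
      exact hndvd ((PySem.Int.mod_eq_zero_iff_dvd _ _).mp h)
    rw [if_pos hmod, show ((PySem.Int.mod ((PySem.Int.toChars number).length : Int) chunk_size != 0) : Bool) = true from bne_iff_ne.mpr hmod, Bool.true_or]
  obtain ⟨csn, rfl⟩ : ∃ m : Nat, chunk_size = (m : Int) :=
    ⟨chunk_size.toNat, (Int.toNat_of_nonneg (by omega)).symm⟩
  have hcs : 0 < csn := by exact_mod_cast hpre
  unfold is_valid_chunk is_valid_chunk_alt
  simp only [PySem.List.len_eq]
  set l := PySem.Int.toChars number with hl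
  by_cases hmod : PySem.Int.mod (l.length : Int) (csn : Int) = 0
  · rw [if_neg (not_not_intro hmod)]
    have hbne : ((PySem.Int.mod (l.length : Int) (csn : Int) != 0) : Bool) = false := by
      simp [hmod]
    rw [hbne, Bool.false_or]
    have hdvd : (csn : Int) ∣ (l.length : Int) := (PySem.Int.mod_eq_zero_iff_dvd _ _).mp hmod
    have hdvdn : csn ∣ l.length := by exact_mod_cast hdvd
    obtain ⟨q, hq⟩ := hdvdn
    have hcsI : (0 : Int) < (csn : Int) := by exact_mod_cast hcs
    -- the range has exactly q elements
    have hcount : PySem.List.pyRange 0 (l.length : Int) (csn : Int)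
        = (List.range q).map (fun k => ((csn * k : Nat) : Int)) := by
      rw [PySem.List.pyRange_of_pos _ _ hcsI]
      have hcnt : (if (0:Int) < (l.length : Int) then
          (((l.length : Int) - 0 + csn - 1) / csn).toNat else 0) = q := by
        rcases Nat.eq_zero_or_pos l.length with h0 | hpos
        · have hq0 : q = 0 := by
            rcases Nat.eq_zero_or_pos q with h | h
            · exact h
            · exfalso; rw [h0] at hq; nlinarith
          rw [if_neg (by simp [h0]), hq0]
        · rw [if_pos (by exact_mod_cast hpos)]
          have h1 : ((l.length : Int) - 0 + csn - 1) = ((l.length + (csn - 1) : Nat) : Int) := by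
            omega
          rw [h1, ← Int.natCast_div, Int.toNat_natCast, hq, Nat.mul_add_div hcs,
            Nat.div_eq_of_lt (by omega), Nat.add_zero]
      rw [hcnt]
      apply List.map_congr_left
      intro k _
      push_cast; ring
    rw [hcount, List.map_map]
    -- each slice is a drop/take chunk
    have hchunks : ((List.range q).map
        ((fun i => PySem.List.slice l (some i) (some (i + (csn : Int)))) ∘ (fun k => ((csn * k : Nat) : Int))))
        = (List.range q).map (fun k => (l.drop (k * csn)).take csn) := by
      apply List.map_congr_left
      intro k _
      simp only [Function.comp]
      rw [PySem.List.slice_natCast_add l (csn * k) csn, Nat.mul_comm]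
    rw [hchunks]
    -- B's slices
    rw [PySem.List.slice_from_natCast, PySem.List.slice_to_neg_natCast _ _ hcs]
    rcases Nat.eq_zero_or_pos q with hq0 | hqpos
    · subst hq0
      have hnil : l = [] := List.length_eq_zero_iff.mp (by simpa using hq)
      simp [hnil]
    · -- headD of a nonempty range-map is the first chunk, l.take csn
      obtain ⟨q', rfl⟩ : ∃ q', q = q' + 1 := ⟨q - 1, by omega⟩
      have hhead : ((List.range (q' + 1)).map (fun k => (l.drop (k * csn)).take csn)).headD []
          = l.take csn := by
        rw [List.range_succ_eq_map]
        simp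
      rw [hhead]
      have hclen : (l.take csn).length = csn := by
        rw [List.length_take, hq]
        exact Nat.min_eq_left (Nat.le_mul_of_pos_right csn (by omega))
      rw [chunks_all_eq_iff csn (l.take csn) hclen (q' + 1) l (by rw [hq]; ring),
        replicate_eq_shift csn (q' + 1) l (by rw [hq]; ring)]
  · rw [if_pos hmod, show ((PySem.Int.mod ((l.length : Nat) : Int) ((csn : Nat) : Int) != 0) : Bool) = true from bne_iff_ne.mpr hmod, Bool.true_or]
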